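-- pv_equiv track=rewrite | github.com/pypi-data/pypi-mirror-403 | packages/abstract-utilities/abstract_utilities-0.2.2.713-py3-none-any.whl/abstract_utilities/circular_import_finder.py | find_circular_chains
-- ===== SOURCE A (Python) =====
-- def find_circular_chains(graph):
--     """Detect circular imports and return their full dependency paths."""
--     visited, cycles = set(), []
--
--     def dfs(node, path):
--         visited.add(node)
--         path.append(node)
--         for dep in graph.get(node, []):
--             if dep not in path:
--                 dfs(dep, path.copy())
--             else:
--                 # Found a circular import
--                 cycle_start = path.index(dep)
--                 cycle = path[cycle_start:] + [dep]
--                 if cycle not in cycles: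
--                     cycles.append(cycle)
--         return
--
--     for start in graph:
--         dfs(start, [])
--     return cycles
-- ===== SOURCE B (Python) =====
-- def find_circular_chains(graph):
--     """Detect circular imports and return their full dependency paths.
--
--     Iterative DFS: an explicit stack of work items replaces the recursion.
--     """
--     cycles = []
--     stack = [("descend", node, []) for node in reversed(list(graph))]
--     while stack:
--         item = stack.pop()
--         if item[0] == "record":
--             cycle = item[1]
--             if cycle not in cycles:
--                 cycles.append(cycle)
--         else:
--             _, node, path = item
--             path = path + [node]
--             children = []
--             for dep in graph.get(node, []):
--                 if dep in path:
--                     children.append(("record", path[path.index(dep):] + [dep]))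
--                 else:
--                     children.append(("descend", dep, path))
--             stack.extend(reversed(children))
--     return cycles
-- ===== Notes on version B (the rewrite author's own statement) =====
-- stated objective: alternative
-- what changed: The recursive dfs helper with a shared mutable cycles list is replaced by an iterative DFS over an explicit stack of ('descend', node, path) / ('record', cycle) work items, seeded once with all start nodes and popped in pre-order.
import Mathlib
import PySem

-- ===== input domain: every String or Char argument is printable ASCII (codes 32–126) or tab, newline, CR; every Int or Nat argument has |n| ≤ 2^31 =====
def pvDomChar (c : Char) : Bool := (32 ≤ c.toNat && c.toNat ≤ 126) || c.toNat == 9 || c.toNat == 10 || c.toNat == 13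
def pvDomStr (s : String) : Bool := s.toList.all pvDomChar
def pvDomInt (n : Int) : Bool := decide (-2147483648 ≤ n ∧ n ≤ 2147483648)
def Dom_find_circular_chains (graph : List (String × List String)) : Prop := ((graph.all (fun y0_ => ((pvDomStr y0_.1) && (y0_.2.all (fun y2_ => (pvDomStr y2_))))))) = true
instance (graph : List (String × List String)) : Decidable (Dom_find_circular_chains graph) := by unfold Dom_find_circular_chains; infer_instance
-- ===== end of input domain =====

-- B replaces A's recursive dfs helper by an iterative DFS over an explicit stack of
-- descend/record work items (an alternative decomposition, same cost).

-- ===== PORT A =====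
-- all nodes mentioned by the graph (keys and dependencies); used only by the
-- totality guards of both ports (a DFS path never repeats a node, so its length
-- is bounded by this list's length — the guards are never reached from the entry points)
def pvNodes (graph : List (String × List String)) : List String :=
  graph.flatMap (fun kv => kv.1 :: kv.2)

-- cited by the termination proof of pvRunB below
theorem pvGetD_len_le (graph : List (String × List String)) (node : String) :
    ((PySem.Dict.mk graph).getD node []).length ≤ (pvNodes graph).length := by
  induction graph with
  | nil => simp [PySem.Dict.getD, PySem.Dict.get?, pvNodes]
  | cons kv g ih =>
    obtain ⟨k, v⟩ := kv
    rw [PySem.Dict.getD, PySem.Dict.get?_mk_cons]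
    by_cases h : k == node
    · simp only [h, if_pos, Option.getD_some, pvNodes, List.flatMap_cons]
      simp
      omega
    · simp only [h, if_neg, Bool.false_eq_true, not_false_iff]
      rw [← PySem.Dict.getD]
      calc ((PySem.Dict.mk g).getD node []).length ≤ (pvNodes g).length := ih
        _ ≤ (pvNodes ((k, v) :: g)).length := by simp [pvNodes]; omega

-- A's dfs: `visited` is write-only in A but threaded faithfully as part of the state;
-- the `path.length` test is a totality guard only (never reached from find_circular_chains)
mutual
def pvDfsA (graph : List (String × List String)) (node : String) (path : List String)
    (st : PySem.Set String × List (List String)) : PySem.Set String × List (List String) :=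
  if (pvNodes graph).length + 1 ≤ path.length then st
  else
    pvLoopA graph (path ++ [node]) ((PySem.Dict.mk graph).getD node [])
      (PySem.Set.add st.1 node, st.2)
termination_by ((pvNodes graph).length + 1 - path.length, 0)

-- the `for dep in graph.get(node, [])` loop of A's dfs
def pvLoopA (graph : List (String × List String)) (path : List String)
    (deps : List String) (st : PySem.Set String × List (List String)) :
    PySem.Set String × List (List String) :=
  match deps with
  | [] => st
  | dep :: ds =>
    if dep ∉ path then
      pvLoopA graph path ds (pvDfsA graph dep path st)
    else
      let i := (PySem.List.index? path dep).getD 0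
      let cycle := path.drop i ++ [dep]
      pvLoopA graph path ds (if cycle ∈ st.2 then st else (st.1, st.2 ++ [cycle]))
termination_by ((pvNodes graph).length + 1 - path.length, deps.length)
end

def find_circular_chains (graph : List (String × List String)) : List (List String) :=
  (graph.foldl (fun st kv => pvDfsA graph kv.1 [] st)
    ((PySem.Set.empty : PySem.Set String), ([] : List (List String)))).2

-- ===== PORT B =====
-- a work item of B's explicit stack
inductive PvItem where
  | descend (node : String) (path : List String)
  | record (cycle : List String)
deriving DecidableEq, Repr

-- termination weight of a work item (proof device only; B's Python runs a plain while loop)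
def pvWt (N : Nat) : PvItem → Nat
  | .record _ => 1
  | .descend _ p => (N + 2) ^ (N + 1 - p.length)

-- the while loop of B: pop the front item, push its children back in order
-- (the Python pushes the reversed children and pops from the end — the same pop order);
-- the `path.length` test is a totality guard only (never reached from find_circular_chains_alt)
def pvRunB (graph : List (String × List String)) (stack : List PvItem)
    (cycles : List (List String)) : List (List String) :=
  match stack with
  | [] => cycles
  | .record c :: rest =>
    pvRunB graph rest (if c ∈ cycles then cycles else cycles ++ [c])
  | .descend node p :: rest =>
    if (pvNodes graph).length + 1 ≤ p.length then pvRunB graph rest cycles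
    else
      let path := p ++ [node]
      let children := ((PySem.Dict.mk graph).getD node []).map (fun dep =>
        if dep ∈ path then
          PvItem.record (path.drop ((PySem.List.index? path dep).getD 0) ++ [dep])
        else PvItem.descend dep path)
      pvRunB graph (children ++ rest) cycles
termination_by (stack.map (pvWt (pvNodes graph).length)).sum
decreasing_by
  all_goals simp only [List.map_cons, List.map_append, List.sum_cons, List.sum_append, pvWt]
  all_goals (first | omega | skip)
  · exact Nat.lt_add_of_pos_left (Nat.pow_pos (by omega))
  · rename_i hguard
    refine Nat.add_lt_add_right ?_ _
    have hlen := pvGetD_len_le graph node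
    have hX : 0 < ((pvNodes graph).length + 2) ^ ((pvNodes graph).length - p.length) :=
      Nat.pow_pos (by omega)
    have hb : ∀ x ∈ (List.map (pvWt (pvNodes graph).length)
        (List.map (fun dep =>
          if dep ∈ p ++ [node] then
            PvItem.record (List.drop ((PySem.List.index? (p ++ [node]) dep).getD 0) (p ++ [node]) ++ [dep])
          else PvItem.descend dep (p ++ [node]))
          ((PySem.Dict.mk graph).getD node []))),
        x ≤ ((pvNodes graph).length + 2) ^ ((pvNodes graph).length - p.length) := by
      intro x hx
      simp only [List.map_map, List.mem_map, Function.comp] at hx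
      obtain ⟨a, -, rfl⟩ := hx
      by_cases hmem : a ∈ p ++ [node]
      · simp only [hmem, if_pos, pvWt]
        exact Nat.one_le_pow _ _ (by omega)
      · simp only [hmem, if_neg, not_false_iff, pvWt, List.length_append,
          List.length_singleton]
        rw [show (pvNodes graph).length + 1 - (p.length + 1) = (pvNodes graph).length - p.length from by omega]
    have hs := List.sum_le_card_nsmul _ _ hb
    simp only [List.length_map, smul_eq_mul] at hs
    have hmul : ((PySem.Dict.mk graph).getD node []).length *
        ((pvNodes graph).length + 2) ^ ((pvNodes graph).length - p.length) <
        ((pvNodes graph).length + 2) ^ ((pvNodes graph).length + 1 - p.length) := by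
      rw [show (pvNodes graph).length + 1 - p.length = ((pvNodes graph).length - p.length) + 1 from by omega,
        pow_succ]
      calc ((PySem.Dict.mk graph).getD node []).length *
            ((pvNodes graph).length + 2) ^ ((pvNodes graph).length - p.length)
          ≤ (pvNodes graph).length * ((pvNodes graph).length + 2) ^ ((pvNodes graph).length - p.length) :=
            Nat.mul_le_mul_right _ hlen
        _ < ((pvNodes graph).length + 2) ^ ((pvNodes graph).length - p.length) * ((pvNodes graph).length + 2) := by
            rw [Nat.mul_comm]
            exact (Nat.mul_lt_mul_left hX).mpr (by omega)
    exact Nat.lt_of_le_of_lt hs hmul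

def find_circular_chains_alt (graph : List (String × List String)) : List (List String) :=
  pvRunB graph (graph.map (fun kv => PvItem.descend kv.1 [])) []

-- ===== PRECONDITION & SPEC =====
def Spec_find_circular_chains (graph : List (String × List String)) (out : List (List String)) : Prop := out = find_circular_chains_alt graph
instance (graph : List (String × List String)) (out : List (List String)) : Decidable (Spec_find_circular_chains graph out) := by unfold Spec_find_circular_chains; infer_instance

-- ===== CLAIM (what is proved, stated in full; the proofs are below) =====
def Claim_equal_find_circular_chains : Prop := ∀ (graph : List (String × List String)), Dom_find_circular_chains graph → Spec_find_circular_chains graph (find_circular_chains graph)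

-- ===== LEMMAS AND PROOFS =====

-- every dependency list the graph can hand out consists of mentioned nodes
theorem pvMem_getD (graph : List (String × List String)) (node dep : String)
    (h : dep ∈ (PySem.Dict.mk graph).getD node []) : dep ∈ pvNodes graph := by
  induction graph with
  | nil => simp [PySem.Dict.getD, PySem.Dict.get?] at h
  | cons kv g ih =>
    obtain ⟨k, v⟩ := kv
    rw [PySem.Dict.getD, PySem.Dict.get?_mk_cons] at h
    by_cases hk : k == node
    · simp only [hk, if_pos, Option.getD_some] at h
      simp [pvNodes]
      tauto
    · simp only [hk, Bool.false_eq_true, not_false_iff, if_neg] at h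
      rw [← PySem.Dict.getD] at h
      have := ih h
      simp [pvNodes] at this ⊢
      exact Or.inr (Or.inr this)

-- a duplicate-free path of mentioned nodes is no longer than the node list
theorem pvInv_len {graph : List (String × List String)} {n : String} {p : List String}
    (hnd : (p ++ [n]).Nodup) (hsub : ∀ x ∈ p ++ [n], x ∈ pvNodes graph) :
    p.length + 1 ≤ (pvNodes graph).length := by
  have hsp : (p ++ [n]).Subperm (pvNodes graph) := hnd.subperm hsub
  have := hsp.length_le
  simpa using this

-- the heart of the equivalence: popping a descend item and then running the rest of the
-- stack is running the rest of the stack on the state A's recursive dfs produces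
theorem pvBridge (graph : List (String × List String)) :
    ∀ (k : Nat) (n : String) (p : List String),
    (pvNodes graph).length - p.length ≤ k →
    (p ++ [n]).Nodup → (∀ x ∈ p ++ [n], x ∈ pvNodes graph) →
    ∀ (v : PySem.Set String) (cy : List (List String)) (rest : List PvItem),
    pvRunB graph (PvItem.descend n p :: rest) cy
      = pvRunB graph rest (pvDfsA graph n p (v, cy)).2 := by
  intro k
  induction k with
  | zero =>
    intro n p hk hnd hsub
    have := pvInv_len hnd hsub
    omega
  | succ k ih =>
    intro n p hk hnd hsub v cy rest
    have hg : ¬ ((pvNodes graph).length + 1 ≤ p.length) := by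
      have := pvInv_len hnd hsub; omega
    conv_lhs => rw [pvRunB]
    rw [pvDfsA]
    simp only [hg, if_neg, not_false_iff]
    have hk' : (pvNodes graph).length - (p ++ [n]).length ≤ k := by
      simp only [List.length_append, List.length_singleton]; omega
    suffices H : ∀ (ds : List String), (∀ d ∈ ds, d ∈ pvNodes graph) →
        ∀ (v : PySem.Set String) (cy : List (List String)) (rest : List PvItem),
        pvRunB graph
          (List.map (fun dep =>
            if dep ∈ p ++ [n] then
              PvItem.record (List.drop ((PySem.List.index? (p ++ [n]) dep).getD 0) (p ++ [n]) ++ [dep])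
            else PvItem.descend dep (p ++ [n])) ds ++ rest) cy
          = pvRunB graph rest (pvLoopA graph (p ++ [n]) ds (v, cy)).2 by
      exact H _ (fun d hd => pvMem_getD graph n d hd) _ _ _
    intro ds hds
    induction ds with
    | nil =>
      intro v cy rest
      rw [pvLoopA]
      simp only [List.map_nil, List.nil_append]
    | cons d ds ihd =>
      intro v cy rest
      have hdn : d ∈ pvNodes graph := hds d List.mem_cons_self
      have hds' : ∀ x ∈ ds, x ∈ pvNodes graph := fun x hx => hds x (List.mem_cons_of_mem _ hx)
      rw [pvLoopA]
      by_cases hmem : d ∈ p ++ [n]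
      · simp only [List.map_cons, List.cons_append]
        rw [if_pos hmem, if_neg (not_not_intro hmem)]
        conv_lhs => rw [pvRunB]
        by_cases hc : (List.drop ((PySem.List.index? (p ++ [n]) d).getD 0) (p ++ [n]) ++ [d]) ∈ cy
        · rw [if_pos hc, if_pos hc]
          exact ihd hds' v cy rest
        · rw [if_neg hc, if_neg hc]
          exact ihd hds' v _ rest
      · simp only [List.map_cons, List.cons_append]
        rw [if_neg hmem, if_pos hmem]
        rw [ih d (p ++ [n]) hk'
          (by rw [← List.concat_eq_append]; exact hnd.concat hmem)
          (by
            intro x hx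
            rcases List.mem_append.mp hx with hx | hx
            · exact hsub x hx
            · simp at hx; subst hx; exact hdn) v]
        rw [← Prod.mk.eta (p := pvDfsA graph d (p ++ [n]) (v, cy))]
        exact ihd hds' _ _ rest

-- seeding the stack with start nodes = A's outer `for start in graph` loop
theorem pvTop (graph : List (String × List String)) :
    ∀ (ks : List (String × List String)), (∀ kv ∈ ks, kv.1 ∈ pvNodes graph) →
    ∀ (v : PySem.Set String) (cy : List (List String)),
    pvRunB graph (ks.map (fun kv => PvItem.descend kv.1 [])) cy
      = (ks.foldl (fun st kv => pvDfsA graph kv.1 [] st) (v, cy)).2 := by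
  intro ks
  induction ks with
  | nil => intro _ v cy; simp only [List.map_nil, List.foldl_nil]; rw [pvRunB]
  | cons kv t ih =>
    intro hks v cy
    simp only [List.map_cons, List.foldl_cons]
    rw [pvBridge graph (pvNodes graph).length kv.1 [] (by omega)
      (by simp)
      (by intro x hx; simp at hx; subst hx; exact hks kv List.mem_cons_self) v]
    rw [← Prod.mk.eta (p := pvDfsA graph kv.1 [] (v, cy))]
    exact ih (fun kv' h => hks kv' (List.mem_cons_of_mem _ h)) _ _

-- ===== VERDICT (by name: the statement is the Claim_ definition above) =====
theorem find_circular_chains_spec : Claim_equal_find_circular_chains := by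
  intro graph _
  unfold Spec_find_circular_chains find_circular_chains find_circular_chains_alt
  rw [pvTop graph graph
    (fun kv h => by simp only [pvNodes, List.mem_flatMap]; exact ⟨kv, h, List.mem_cons_self⟩)
    PySem.Set.empty []]
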